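-- pv_equiv track=rewrite | github.com/oshp/headers | lib/database/rdms_db.py | _header_name_table
-- ===== SOURCE A (Python) =====
-- def _header_name_table(data):
--     count = 0
--     table = {}
--     for site in data:
--         for header_name in site['headers'].keys():
--             if header_name not in table.keys():
--                 count += 1
--                 table[header_name] = count
--     return table
-- ===== SOURCE B (Python) =====
-- def _header_name_table(data):
--     names = [h for site in data for h in site['headers'].keys()]
--     return {h: len(set(names[:i + 1]))
--             for i, h in enumerate(names) if h not in names[:i]}
-- ===== Notes on version B (the rewrite author's own statement) =====
-- stated objective: alternative
-- what changed: Instead of A's fused loop maintaining a counter and a growing table, B flattens all header names, keeps exactly the first occurrences (those not present in the preceding prefix), and computes each id independently as the number of distinct names in the prefix up to and including that occurrence; no counter and no incrementally built table.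
import Mathlib
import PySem

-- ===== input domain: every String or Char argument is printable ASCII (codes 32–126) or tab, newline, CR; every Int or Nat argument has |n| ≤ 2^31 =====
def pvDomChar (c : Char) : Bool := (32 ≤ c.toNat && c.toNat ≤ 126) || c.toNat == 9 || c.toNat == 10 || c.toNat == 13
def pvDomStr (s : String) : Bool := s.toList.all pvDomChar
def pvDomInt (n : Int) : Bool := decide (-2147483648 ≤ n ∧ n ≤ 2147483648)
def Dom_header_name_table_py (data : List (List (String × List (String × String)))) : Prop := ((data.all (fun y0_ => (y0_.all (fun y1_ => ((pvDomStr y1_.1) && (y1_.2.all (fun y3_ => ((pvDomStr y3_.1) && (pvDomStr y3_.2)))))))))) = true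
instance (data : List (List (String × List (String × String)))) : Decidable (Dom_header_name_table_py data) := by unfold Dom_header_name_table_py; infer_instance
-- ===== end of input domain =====

-- B drops A's counter/table loop: it flattens the names, keeps first occurrences (prefix
-- membership test) and computes each id as the distinct count of its inclusive prefix.

-- shared accessor for the Python expression `site['headers'].keys()` (both sources contain it verbatim);
-- `.getD []` is only reached outside Pre_ (Python raises KeyError there)
def pvSiteHeaderKeys (site : List (String × List (String × String))) : List String :=
  (PySem.Dict.ofList (((PySem.Dict.ofList site).get? "headers").getD [])).keys

-- ===== PORT A =====
def hntStep (acc : Int × PySem.Dict String Int) (h : String) : Int × PySem.Dict String Int :=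
  if acc.2.keys.contains h then acc else (acc.1 + 1, acc.2.insert h (acc.1 + 1))

def header_name_table_py (data : List (List (String × List (String × String)))) : List (String × Int) :=
  (data.foldl (fun acc site => (pvSiteHeaderKeys site).foldl hntStep acc)
    ((0 : Int), PySem.Dict.empty)).2.items

-- ===== PORT B =====
-- names[:i] / names[:i+1] with the nonnegative enumerate index i are exactly List.take
def header_name_table_py_alt (data : List (List (String × List (String × String)))) : List (String × Int) :=
  let names := data.flatMap (fun site => pvSiteHeaderKeys site)
  ((PySem.List.enumerate names 0).filter
      (fun p => !((names.take p.1.toNat).contains p.2))).map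
    (fun p => (p.2, ((PySem.Set.ofList (names.take (p.1.toNat + 1))).length : Int)))

-- ===== PRECONDITION & SPEC =====
-- Pre_ excludes exactly the inputs where some site has no 'headers' key: there A raises KeyError.
def Pre_header_name_table_py (data : List (List (String × List (String × String)))) : Prop :=
  (data.all (fun site => (PySem.Dict.ofList site).contains "headers")) = true
instance (data : List (List (String × List (String × String)))) : Decidable (Pre_header_name_table_py data) := by unfold Pre_header_name_table_py; infer_instance

def pvWitness_header_name_table_py : (List (List (String × List (String × String)))) :=
  [[("headers", [("X-Frame-Options", "deny"), ("Server", "x")])], [("headers", [("Server", "y")])]]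

def Spec_header_name_table_py (data : List (List (String × List (String × String)))) (out : List (String × Int)) : Prop := out = header_name_table_py_alt data
instance (data : List (List (String × List (String × String)))) (out : List (String × Int)) : Decidable (Spec_header_name_table_py data out) := by unfold Spec_header_name_table_py; infer_instance

-- ===== CLAIM (what is proved, stated in full; the proofs are below) =====
def Claim_equal_header_name_table_py : Prop := ∀ (data : List (List (String × List (String × String)))), Dom_header_name_table_py data → Pre_header_name_table_py data → Spec_header_name_table_py data (header_name_table_py data)

-- ===== LEMMAS AND PROOFS =====

-- canonical form of A's fold over one flat list of names: count = number of distinct names,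
-- table = the distinct names numbered from 1
lemma hnt_foldl_eq (K : List String) :
    K.foldl hntStep ((0 : Int), PySem.Dict.empty)
      = ((((PySem.List.dedup K).length : Nat) : Int),
         PySem.Dict.mk ((PySem.List.enumerate (PySem.List.dedup K) 1).map (fun p => (p.2, p.1)))) := by
  induction K using List.reverseRecOn with
  | nil => rfl
  | append_singleton K k ih =>
    rw [List.foldl_append, ih]
    simp only [PySem.List.dedup_eq_ofList, PySem.Set.ofList_append_singleton] at *
    by_cases hk : k ∈ PySem.Set.ofList K
    · rw [PySem.Set.add_of_mem hk]
      have hmem : (PySem.Dict.mk ((PySem.List.enumerate (PySem.Set.ofList K) 1).map (fun p => (p.2, p.1)))).keys.contains k = true := by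
        simp [PySem.Dict.keys, List.map_map, Function.comp_def, PySem.List.map_snd_enumerate, hk]
      simp only [List.foldl_cons, List.foldl_nil, hntStep, hmem, if_true]
    · rw [PySem.Set.add_of_not_mem hk]
      have hmem : (PySem.Dict.mk ((PySem.List.enumerate (PySem.Set.ofList K) 1).map (fun p => (p.2, p.1)))).keys.contains k = false := by
        simp [PySem.Dict.keys, List.map_map, Function.comp_def, PySem.List.map_snd_enumerate, hk]
      simp only [List.foldl_cons, List.foldl_nil, hntStep, hmem, Bool.false_eq_true, if_false]
      refine Prod.ext ?_ ?_
      · push_cast [List.length_append, List.length_cons, List.length_nil]; ring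
      · apply PySem.Dict.ext
        rw [PySem.Dict.items_insert_of_not_contains _ _ (by
          rw [PySem.Dict.contains_eq_decide_mem_keys]
          simpa [PySem.Dict.keys, List.map_map, Function.comp_def, PySem.List.map_snd_enumerate] using hk)]
        simp [PySem.List.enumerate_append, PySem.List.enumerate_cons, PySem.List.enumerate_nil]
        ring

-- canonical form of B's filter/map over one flat list of names
lemma hnt_alt_eq (K : List String) :
    ((PySem.List.enumerate K 0).filter
        (fun p => !((K.take p.1.toNat).contains p.2))).map
      (fun p => (p.2, ((PySem.Set.ofList (K.take (p.1.toNat + 1))).length : Int)))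
      = (PySem.List.enumerate (PySem.List.dedup K) 1).map (fun p => (p.2, p.1)) := by
  induction K using List.reverseRecOn with
  | nil => rfl
  | append_singleton K k ih =>
    rw [PySem.List.enumerate_append, PySem.List.enumerate_cons, PySem.List.enumerate_nil,
      List.filter_append, List.map_append]
    have hfc :
        (PySem.List.enumerate K 0).filter
            (fun p => !(((K ++ [k]).take p.1.toNat).contains p.2))
          = (PySem.List.enumerate K 0).filter
            (fun p => !((K.take p.1.toNat).contains p.2)) := by
      apply List.filter_congr
      intro p hp
      obtain ⟨i, hi, rfl⟩ := (PySem.List.mem_enumerate_iff _ _ _).1 hp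
      have : ((0 : Int) + i).toNat = i := by omega
      rw [this, List.take_append_of_le_length (le_of_lt hi)]
    rw [hfc]
    have hmc :
        ((PySem.List.enumerate K 0).filter
            (fun p => !((K.take p.1.toNat).contains p.2))).map
          (fun p => (p.2, ((PySem.Set.ofList ((K ++ [k]).take (p.1.toNat + 1))).length : Int)))
          = ((PySem.List.enumerate K 0).filter
            (fun p => !((K.take p.1.toNat).contains p.2))).map
          (fun p => (p.2, ((PySem.Set.ofList (K.take (p.1.toNat + 1))).length : Int))) := by
      apply List.map_congr_left
      intro p hp
      have hp' := List.mem_of_mem_filter hp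
      obtain ⟨i, hi, rfl⟩ := (PySem.List.mem_enumerate_iff _ _ _).1 hp'
      have h1 : ((0 : Int) + i).toNat = i := by omega
      rw [h1, List.take_append_of_le_length (by omega)]
    rw [hmc, ih]
    have hlast : ((0 : Int) + K.length).toNat = K.length := by omega
    by_cases hk : k ∈ K
    · have hcont : ((K ++ [k]).take ((0 : Int) + K.length).toNat).contains k = true := by
        rw [hlast, List.take_left]; simpa using hk
      simp only [PySem.List.dedup_eq_ofList, PySem.Set.ofList_append_singleton,
        PySem.Set.add_of_mem (by simpa [PySem.Set.mem_ofList] using hk : k ∈ PySem.Set.ofList K),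
        List.filter_cons, List.filter_nil, hcont, Bool.not_true]
      simp
    · have hcont : ((K ++ [k]).take ((0 : Int) + K.length).toNat).contains k = false := by
        rw [hlast, List.take_left]; simpa using hk
      have hset : k ∉ PySem.Set.ofList K := by simpa [PySem.Set.mem_ofList] using hk
      simp only [PySem.List.dedup_eq_ofList, PySem.Set.ofList_append_singleton,
        PySem.Set.add_of_not_mem hset, List.filter_cons, List.filter_nil, hcont, Bool.not_false,
        PySem.List.enumerate_append, PySem.List.enumerate_cons, PySem.List.enumerate_nil,
        List.map_append, List.map_cons, List.map_nil, if_pos trivial]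
      refine congrArg _ ?_
      have htake : ((K ++ [k]).take (((0 : Int) + K.length).toNat + 1)) = K ++ [k] := by
        rw [hlast, List.take_of_length_le (by simp)]
      simp only [htake, PySem.Set.ofList_append_singleton, PySem.Set.add_of_not_mem hset,
        List.length_append, List.length_cons, List.length_nil]
      refine congrArg (fun x => [(k, x)]) ?_
      push_cast
      ring

-- ===== VERDICT (by name: the statement is the Claim_ definition above) =====
theorem header_name_table_py_spec : Claim_equal_header_name_table_py := by
  intro data _ _
  unfold Spec_header_name_table_py header_name_table_py header_name_table_py_alt
  conv_lhs => rw [← List.foldl_flatMap]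
  rw [hnt_foldl_eq, hnt_alt_eq]
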